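-- pv_equiv track=rewrite | github.com/scout719/adventOfCode | 2022/adventOfCode_01.py | day1_parse
-- ===== SOURCE A (Python) =====
-- def day1_parse(data):
--     elfs = []
--     curr = []
--     for line in data:
--         if line == "":
--             elfs.append(curr)
--             curr = []
--         else:
--             curr.append(int(line))
--     elfs.append(curr)
--     return elfs
-- ===== SOURCE B (Python) =====
-- def day1_parse(data):
--     # Split off the leading group at each blank separator using index/slices,
--     # instead of accumulating element by element.
--     lines = list(data)
--     elfs = []
--     while "" in lines:
--         i = lines.index("")
--         elfs.append([int(x) for x in lines[:i]])
--         lines = lines[i + 1:]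
--     elfs.append([int(x) for x in lines])
--     return elfs
-- ===== Notes on version B (the rewrite author's own statement) =====
-- stated objective: alternative
-- what changed: B repeatedly locates the next blank separator with index() and slices out the whole group at once, instead of A's single fold that grows a current-group accumulator line by line.
import Mathlib
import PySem

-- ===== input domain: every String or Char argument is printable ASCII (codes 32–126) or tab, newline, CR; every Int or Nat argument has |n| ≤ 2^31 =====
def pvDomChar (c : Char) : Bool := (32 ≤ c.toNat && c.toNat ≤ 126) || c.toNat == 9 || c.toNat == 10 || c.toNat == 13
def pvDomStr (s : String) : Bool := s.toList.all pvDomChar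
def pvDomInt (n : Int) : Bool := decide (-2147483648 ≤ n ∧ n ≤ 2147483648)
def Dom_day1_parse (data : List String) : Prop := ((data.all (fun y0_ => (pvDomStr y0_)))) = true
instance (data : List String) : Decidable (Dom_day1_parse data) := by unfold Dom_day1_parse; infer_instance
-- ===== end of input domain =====

-- B splits off whole groups at each blank separator found with index(); A folds line by line. Same values; objective: alternative decomposition.

-- int(line); exact on Pre_ (ofStr? is some there)
def pvInt (s : String) : Int := (PySem.Int.ofStr? s).getD 0

-- ===== PORT A =====
def day1_parse (data : List String) : List (List Int) :=
  let s := data.foldl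
    (fun (st : List (List Int) × List Int) line =>
      if line == "" then (st.1 ++ [st.2], ([] : List Int))
      else (st.1, st.2 ++ [pvInt line]))
    (([] : List (List Int)), ([] : List Int))
  s.1 ++ [s.2]

-- ===== PORT B =====
-- the while loop of Source B: '"" in lines' + lines.index("") is index? (none = not a member)
def day1AltGo (lines : List String) (elfs : List (List Int)) : List (List Int) :=
  match h : PySem.List.index? lines "" with
  | none => elfs ++ [lines.map pvInt]
  | some i => day1AltGo (lines.drop (i + 1)) (elfs ++ [(lines.take i).map pvInt])
termination_by lines.length
decreasing_by
  obtain ⟨hk, _, _⟩ := PySem.List.getElem_of_index?_eq_some h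
  simp only [List.length_drop]; omega

def day1_parse_alt (data : List String) : List (List Int) :=
  day1AltGo data []

-- ===== PRECONDITION & SPEC =====
-- Pre_ excludes inputs with a non-empty line that is not a valid int literal: A raises ValueError there.
def Pre_day1_parse (data : List String) : Prop :=
  (data.all (fun s => s == "" || (PySem.Int.ofStr? s).isSome)) = true
instance (data : List String) : Decidable (Pre_day1_parse data) := by unfold Pre_day1_parse; infer_instance
def pvWitness_day1_parse : List String := ["1", "2", "", "-3"]

def Spec_day1_parse (data : List String) (out : List (List Int)) : Prop := out = day1_parse_alt data
instance (data : List String) (out : List (List Int)) : Decidable (Spec_day1_parse data out) := by unfold Spec_day1_parse; infer_instance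

-- ===== CLAIM (what is proved, stated in full; the proofs are below) =====
def Claim_equal_day1_parse : Prop := ∀ (data : List String), Dom_day1_parse data → Pre_day1_parse data → Spec_day1_parse data (day1_parse data)

-- ===== LEMMAS AND PROOFS =====

-- reference recursive grouping, used only by the proofs
def pvG (curr : List Int) : List String → List (List Int)
  | [] => [curr]
  | l :: t => if l = "" then curr :: pvG [] t else pvG (curr ++ [pvInt l]) t

theorem pvA_fold (ls : List String) : ∀ (elfs : List (List Int)) (curr : List Int),
    (ls.foldl
      (fun (st : List (List Int) × List Int) line =>
        if line == "" then (st.1 ++ [st.2], ([] : List Int))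
        else (st.1, st.2 ++ [pvInt line])) (elfs, curr)).1
    ++ [(ls.foldl
      (fun (st : List (List Int) × List Int) line =>
        if line == "" then (st.1 ++ [st.2], ([] : List Int))
        else (st.1, st.2 ++ [pvInt line])) (elfs, curr)).2]
    = elfs ++ pvG curr ls := by
  induction ls with
  | nil => simp [pvG]
  | cons l t ih =>
    intro elfs curr
    by_cases hl : l = ""
    · subst hl
      have hb : (("" : String) == "") = true := by simp
      simp only [List.foldl_cons, hb, if_true]
      rw [ih (elfs ++ [curr]) []]
      simp [pvG]
    · have hb : ((l : String) == "") = false := by simp [hl]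
      simp only [List.foldl_cons, hb, Bool.false_eq_true, if_false]
      rw [ih elfs (curr ++ [pvInt l])]
      simp [pvG, hl]

theorem pvG_noblank (ls : List String) : ∀ (curr : List Int), "" ∉ ls →
    pvG curr ls = [curr ++ ls.map pvInt] := by
  induction ls with
  | nil => simp [pvG]
  | cons l t ih =>
    intro curr h
    simp only [List.mem_cons, not_or] at h
    simp [pvG, Ne.symm h.1, ih _ h.2]

theorem pvG_blank (ls : List String) : ∀ (curr : List Int) (i : Nat),
    PySem.List.index? ls "" = some i →
    pvG curr ls = (curr ++ (ls.take i).map pvInt) :: pvG [] (ls.drop (i + 1)) := by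
  induction ls with
  | nil => intro curr i h; simp [PySem.List.index?_eq_idxOf?] at h
  | cons l t ih =>
    intro curr i h
    by_cases hl : l = ""
    · subst hl
      rw [PySem.List.index?_cons_self] at h
      cases h
      simp [pvG]
    · rw [PySem.List.index?_cons_of_ne t hl] at h
      cases hi : PySem.List.index? t "" with
      | none => rw [hi] at h; simp at h
      | some j =>
        rw [hi] at h
        simp only [Option.map_some] at h
        cases h
        simp [pvG, hl, ih _ j hi, List.append_assoc]

theorem pvAltGo_eq (n : Nat) : ∀ (ls : List String), ls.length ≤ n →
    ∀ (elfs : List (List Int)), day1AltGo ls elfs = elfs ++ pvG [] ls := by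
  induction n with
  | zero =>
    intro ls hls elfs
    have h0 : ls = [] := List.eq_nil_of_length_eq_zero (Nat.le_zero.mp hls)
    subst h0
    rw [day1AltGo]
    split
    · simp [pvG]
    · next i h => simp [PySem.List.index?_eq_idxOf?] at h
  | succ n ih =>
    intro ls hls elfs
    rw [day1AltGo]
    split
    · next h =>
      rw [pvG_noblank ls [] (by rwa [← PySem.List.index?_eq_none_iff])]
      simp
    · next i h =>
      obtain ⟨hk, _, _⟩ := PySem.List.getElem_of_index?_eq_some h
      rw [ih (ls.drop (i + 1)) (by simp only [List.length_drop]; omega)]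
      rw [pvG_blank ls [] i h]
      simp

-- ===== VERDICT (by name: the statement is the Claim_ definition above) =====
theorem day1_parse_spec : Claim_equal_day1_parse := by
  intro data _ _
  show day1_parse data = day1_parse_alt data
  unfold day1_parse day1_parse_alt
  rw [pvA_fold data [] [], pvAltGo_eq data.length data le_rfl []]
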